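-- pv_equiv track=rewrite | github.com/amazon-science/THRONE | throne/throne_score_aqa.py | process_aqa_instance_preds
-- ===== SOURCE A (Python) =====
-- def process_aqa_instance_preds(aqa_responses, num_categories, sorted_categories_idx_to_name):
--     """processes the evaluator model predictions for an instance given different classes and prompts into a nested list of present categories"""
--     responses_by_prompt = [
--         aqa_responses[i * num_categories : (i + 1) * num_categories]
--         for i in range(len(aqa_responses) // num_categories)
--     ]
--     present_classes_by_prompt = [
--         sorted(
--             [
--                 sorted_categories_idx_to_name[i]
--                 for i, a in enumerate(single_prompt_responses)
--                 if a.lower().strip() == "yes"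
--             ]
--         )
--         for single_prompt_responses in responses_by_prompt
--     ]
--     return present_classes_by_prompt
-- ===== SOURCE B (Python) =====
-- def process_aqa_instance_preds(aqa_responses, num_categories, sorted_categories_idx_to_name):
--     """Single streaming pass: walk the flat response list once with a category
--     counter, flushing a sorted group every num_categories responses."""
--     num_groups = len(aqa_responses) // num_categories
--     out = []
--     cur = []
--     cat = 0
--     for resp in aqa_responses[: max(num_groups, 0) * num_categories]:
--         if resp.lower().strip() == "yes":
--             cur.append(sorted_categories_idx_to_name[cat])
--         cat += 1
--         if cat == num_categories:
--             out.append(sorted(cur))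
--             cur = []
--             cat = 0
--     return out
-- ===== Notes on version B (the rewrite author's own statement) =====
-- stated objective: simpler
-- what changed: Replaced A's slice-comprehension plus per-group enumerate/filter passes with a single streaming pass over the flat response list that keeps a category counter and flushes a sorted group every num_categories responses.
import Mathlib
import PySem

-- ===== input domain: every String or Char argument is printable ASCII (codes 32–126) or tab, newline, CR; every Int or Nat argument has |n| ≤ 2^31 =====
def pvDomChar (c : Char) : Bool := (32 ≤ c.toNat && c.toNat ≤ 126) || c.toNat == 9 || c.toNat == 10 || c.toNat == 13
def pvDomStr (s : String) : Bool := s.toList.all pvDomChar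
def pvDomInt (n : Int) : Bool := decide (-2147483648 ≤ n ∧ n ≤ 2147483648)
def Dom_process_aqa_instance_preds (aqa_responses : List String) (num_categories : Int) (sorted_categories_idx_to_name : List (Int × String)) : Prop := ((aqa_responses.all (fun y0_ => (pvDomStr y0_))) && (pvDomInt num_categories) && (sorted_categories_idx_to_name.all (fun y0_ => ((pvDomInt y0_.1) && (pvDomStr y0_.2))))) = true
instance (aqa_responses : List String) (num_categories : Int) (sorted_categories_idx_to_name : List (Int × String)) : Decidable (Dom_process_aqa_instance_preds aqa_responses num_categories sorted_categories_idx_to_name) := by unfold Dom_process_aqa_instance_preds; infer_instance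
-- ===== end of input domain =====

-- B replaces A's slice comprehension plus per-group enumerate/filter with one streaming pass
-- over the flat list, a category counter and a flush every num_categories items (objective: simpler).

-- ===== PORT A =====
-- dict lookup sorted_categories_idx_to_name[i] → first match in the association list;
-- `.getD ""` is only reached where Python raises KeyError, which Pre_ excludes.
def process_aqa_instance_preds (aqa_responses : List String) (num_categories : Int) (sorted_categories_idx_to_name : List (Int × String)) : List (List String) :=
  let responses_by_prompt :=
    (PySem.List.pyRange 0 (PySem.Int.floordiv aqa_responses.length num_categories) 1).map
      (fun i => PySem.List.slice aqa_responses (some (i * num_categories)) (some ((i + 1) * num_categories)))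
  responses_by_prompt.map (fun single_prompt_responses =>
    PySem.List.sorted
      ((PySem.List.enumerate single_prompt_responses 0).filterMap
        (fun p => if PySem.Str.strip (PySem.Str.lower p.2) == "yes"
                  then some ((List.lookup p.1 sorted_categories_idx_to_name).getD "")
                  else none))
      (fun x => x) false)

-- ===== PORT B =====
-- `.getD ""` again only reached where Python raises KeyError (outside Pre_).
def process_aqa_instance_preds_alt (aqa_responses : List String) (num_categories : Int) (sorted_categories_idx_to_name : List (Int × String)) : List (List String) :=
  let num_groups := PySem.Int.floordiv aqa_responses.length num_categories
  let st :=
    (PySem.List.slice aqa_responses none (some (max num_groups 0 * num_categories))).foldl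
      (fun (st : List (List String) × List String × Int) resp =>
        let cur := if PySem.Str.strip (PySem.Str.lower resp) == "yes"
                   then st.2.1 ++ [(List.lookup st.2.2 sorted_categories_idx_to_name).getD ""]
                   else st.2.1
        let cat := st.2.2 + 1
        if cat == num_categories
        then (st.1 ++ [PySem.List.sorted cur (fun x => x) false], [], 0)
        else (st.1, cur, cat))
      ([], [], 0)
  st.1

-- ===== PRECONDITION & SPEC =====
-- Pre_ excludes exactly the inputs where Python A raises: num_categories = 0 (ZeroDivisionError),
-- and, for positive num_categories, a 'yes' response inside the full groups whose category index
-- is missing from the dict (KeyError).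
def Pre_process_aqa_instance_preds (aqa_responses : List String) (num_categories : Int) (sorted_categories_idx_to_name : List (Int × String)) : Prop :=
  num_categories ≠ 0 ∧
  (0 < num_categories →
    ∀ p ∈ PySem.List.enumerate
        (PySem.List.slice aqa_responses none
          (some (PySem.Int.floordiv aqa_responses.length num_categories * num_categories))) 0,
      PySem.Str.strip (PySem.Str.lower p.2) = "yes" →
      (List.lookup (PySem.Int.mod p.1 num_categories) sorted_categories_idx_to_name).isSome = true)
instance (aqa_responses : List String) (num_categories : Int) (sorted_categories_idx_to_name : List (Int × String)) : Decidable (Pre_process_aqa_instance_preds aqa_responses num_categories sorted_categories_idx_to_name) := by unfold Pre_process_aqa_instance_preds; infer_instance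

def pvWitness_process_aqa_instance_preds : List String × Int × (List (Int × String)) :=
  (["yes", "no", " YES ", "yes", "x"], 2, [(0, "b"), (1, "a")])

def Spec_process_aqa_instance_preds (aqa_responses : List String) (num_categories : Int) (sorted_categories_idx_to_name : List (Int × String)) (out : List (List String)) : Prop := out = process_aqa_instance_preds_alt aqa_responses num_categories sorted_categories_idx_to_name
instance (aqa_responses : List String) (num_categories : Int) (sorted_categories_idx_to_name : List (Int × String)) (out : List (List String)) : Decidable (Spec_process_aqa_instance_preds aqa_responses num_categories sorted_categories_idx_to_name out) := by unfold Spec_process_aqa_instance_preds; infer_instance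

-- ===== CLAIM (what is proved, stated in full; the proofs are below) =====
def Claim_equal_process_aqa_instance_preds : Prop := ∀ (aqa_responses : List String) (num_categories : Int) (sorted_categories_idx_to_name : List (Int × String)), Dom_process_aqa_instance_preds aqa_responses num_categories sorted_categories_idx_to_name → Pre_process_aqa_instance_preds aqa_responses num_categories sorted_categories_idx_to_name → Spec_process_aqa_instance_preds aqa_responses num_categories sorted_categories_idx_to_name (process_aqa_instance_preds aqa_responses num_categories sorted_categories_idx_to_name)

-- ===== LEMMAS AND PROOFS =====

-- names contributed by a chunk of responses, local category counter starting at k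
def pvChunk (d : List (Int × String)) (k : Int) : List String → List String
  | [] => []
  | a :: t =>
    (if PySem.Str.strip (PySem.Str.lower a) == "yes"
     then [(List.lookup k d).getD ""] else []) ++ pvChunk d (k + 1) t

-- B's loop body, named so the fold lemmas keep it opaque
def pvStepF (nc : Int) (d : List (Int × String))
    (st : List (List String) × List String × Int) (resp : String) :
    List (List String) × List String × Int :=
  let cur := if PySem.Str.strip (PySem.Str.lower resp) == "yes"
             then st.2.1 ++ [(List.lookup st.2.2 d).getD ""]
             else st.2.1
  let cat := st.2.2 + 1
  if cat == nc
  then (st.1 ++ [PySem.List.sorted cur (fun x => x) false], [], 0)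
  else (st.1, cur, cat)

theorem pvStepF_eq (nc : Int) (d : List (Int × String)) :
    (fun (st : List (List String) × List String × Int) resp =>
      let cur := if PySem.Str.strip (PySem.Str.lower resp) == "yes"
                 then st.2.1 ++ [(List.lookup st.2.2 d).getD ""]
                 else st.2.1
      let cat := st.2.2 + 1
      if cat == nc
      then (st.1 ++ [PySem.List.sorted cur (fun x => x) false], [], 0)
      else (st.1, cur, cat)) = pvStepF nc d := rfl

-- A's per-group comprehension over enumerate equals pvChunk
theorem pv_enum_chunk (d : List (Int × String)) (C : List String) (s : Int) :
    (PySem.List.enumerate C s).filterMap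
      (fun p => if PySem.Str.strip (PySem.Str.lower p.2) == "yes"
                then some ((List.lookup p.1 d).getD "") else none)
    = pvChunk d s C := by
  induction C generalizing s with
  | nil => simp [pvChunk, PySem.List.enumerate_nil]
  | cons a t ih =>
    simp only [PySem.List.enumerate_cons, List.filterMap_cons, pvChunk]
    by_cases hy : (PySem.Str.strip (PySem.Str.lower a) == "yes") = true <;>
      · simp [hy]
        simpa using ih (s + 1)

-- B's loop over one full chunk of nc responses: flushes exactly once, at the end
theorem pv_inner (nc : Int) (d : List (Int × String)) (C : List String) :
    ∀ (out : List (List String)) (cur : List String) (cat : Int),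
    cat + C.length = nc → C ≠ [] →
    C.foldl (pvStepF nc d) (out, cur, cat)
    = (out ++ [PySem.List.sorted (cur ++ pvChunk d cat C) (fun x => x) false], [], 0) := by
  induction C with
  | nil => intro _ _ _ _ h; exact absurd rfl h
  | cons a t ih =>
    intro out cur cat hlen _
    rcases List.eq_nil_or_concat t with ht | _
    · subst ht
      have hcat : cat + 1 = nc := by simpa using hlen
      simp only [List.foldl_cons, List.foldl_nil]
      by_cases hy : (PySem.Str.strip (PySem.Str.lower a) == "yes") = true <;>
        simp [pvStepF, pvChunk, hy, hcat]
    · have ht : t ≠ [] := by rintro rfl; simp_all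
      have htl : 0 < (t.length : Int) := by
        exact_mod_cast Nat.pos_of_ne_zero (fun h => ht (List.eq_nil_of_length_eq_zero h))
      have hne : ¬ (cat + 1 == nc) = true := by
        simp only [List.length_cons] at hlen
        simp only [beq_iff_eq]; push_cast at hlen; omega
      have hstep : pvStepF nc d (out, cur, cat) a
          = (out, (if PySem.Str.strip (PySem.Str.lower a) == "yes"
                   then cur ++ [(List.lookup cat d).getD ""] else cur), cat + 1) := by
        simp [pvStepF, hne]
      rw [List.foldl_cons, hstep,
          ih _ _ (cat + 1) (by simp only [List.length_cons] at hlen; push_cast at hlen ⊢; omega) ht]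
      by_cases hy : (PySem.Str.strip (PySem.Str.lower a) == "yes") = true <;>
        simp [pvChunk, hy, List.append_assoc]

-- B's whole loop over G full chunks
theorem pv_outer (nc : Int) (d : List (Int × String)) (m : Nat) (hm : (m : Int) = nc)
    (hm0 : 0 < m) :
    ∀ (G : Nat) (rs : List String) (out : List (List String)),
    G * m ≤ rs.length →
    (rs.take (G * m)).foldl (pvStepF nc d) (out, [], 0)
    = (out ++ (List.range G).map
        (fun g => PySem.List.sorted (pvChunk d 0 ((rs.drop (g * m)).take m)) (fun x => x) false),
       [], 0) := by
  intro G
  induction G with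
  | zero => intro rs out _; simp
  | succ G ih =>
    intro rs out hlen
    rw [Nat.succ_mul] at hlen
    have hsplit : rs.take ((G + 1) * m) = rs.take m ++ ((rs.drop m).take (G * m)) := by
      rw [Nat.succ_mul, Nat.add_comm]
      exact List.take_add
    have hmle : m ≤ rs.length := by omega
    have hC : (rs.take m).length = m := by simp [hmle]
    rw [hsplit, List.foldl_append,
        pv_inner nc d (rs.take m) out [] 0 (by rw [hC]; simpa using hm)
          (by intro h; rw [h] at hC; simp at hC; omega),
        ih (rs.drop m) _ (by simp; omega)]
    rw [List.range_succ_eq_map, List.map_cons, List.map_map]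
    simp only [Nat.zero_mul, List.drop_zero, List.append_assoc, List.singleton_append]
    simp only [List.nil_append]
    congr 2
    refine congrArg₂ List.cons rfl ?_
    apply List.map_congr_left
    intro a _
    have hq : m + a * m = (a + 1) * m := by ring
    simp [Function.comp, hq]

-- ===== VERDICT (by name: the statement is the Claim_ definition above) =====
theorem process_aqa_instance_preds_spec : Claim_equal_process_aqa_instance_preds := by
  intro rs nc d _ hpre
  obtain ⟨hnc, -⟩ := hpre
  show process_aqa_instance_preds rs nc d = process_aqa_instance_preds_alt rs nc d
  simp only [process_aqa_instance_preds, process_aqa_instance_preds_alt]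
  rw [pvStepF_eq]
  rcases lt_trichotomy nc 0 with hneg | hz | hpos
  · -- no full group: both sides are []
    have hG : PySem.Int.floordiv rs.length nc ≤ 0 := by
      by_contra h
      have h1 := PySem.Int.floordiv_mul_add_mod (rs.length : Int) nc
      have h2 := PySem.Int.mod_neg_bounds (a := (rs.length : Int)) hneg
      have h3 : (1 : Int) ≤ PySem.Int.floordiv rs.length nc := by omega
      have h4 : PySem.Int.floordiv rs.length nc * nc ≤ 1 * nc :=
        mul_le_mul_of_nonpos_right h3 (le_of_lt hneg)
      have h5 : (0 : Int) ≤ rs.length := by positivity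
      omega
    rw [PySem.List.pyRange_one_eq_nil hG]
    have hmax : max (PySem.Int.floordiv rs.length nc) 0 = 0 := max_eq_right hG
    rw [hmax, zero_mul]
    simp [PySem.List.slice_to rs (le_refl 0)]
  · exact absurd hz hnc
  · -- positive num_categories: G full groups
    set G' := PySem.Int.floordiv rs.length nc with hG'
    have hG0 : 0 ≤ G' := by
      rw [hG']
      exact (PySem.Int.le_floordiv_iff_mul_le hpos).mpr (by simp)
    have hGle : G' * nc ≤ (rs.length : Int) :=
      (PySem.Int.le_floordiv_iff_mul_le hpos).mp (le_refl G')
    set m := nc.toNat with hmdef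
    have hm : (m : Int) = nc := Int.toNat_of_nonneg (le_of_lt hpos)
    have hm0 : 0 < m := by omega
    set G := G'.toNat with hGdef
    have hGc : (G : Int) = G' := Int.toNat_of_nonneg hG0
    have hGm : G * m ≤ rs.length := by
      have hcast : ((G * m : Nat) : Int) ≤ (rs.length : Int) := by push_cast [hm, hGc]; exact hGle
      exact_mod_cast hcast
    have hmax : max G' 0 = G' := max_eq_left hG0
    rw [hmax]
    have hsliceB : PySem.List.slice rs none (some (G' * nc)) = rs.take (G * m) := by
      rw [PySem.List.slice_to rs (mul_nonneg hG0 (le_of_lt hpos))]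
      congr 1
      have hq : G' * nc = ((G * m : Nat) : Int) := by push_cast [hm, hGc]; ring
      rw [hq, Int.toNat_natCast]
    rw [hsliceB, pv_outer nc d m hm hm0 G rs [] hGm]
    have hrange : PySem.List.pyRange 0 G' 1 = (List.range G).map (fun (k : Nat) => (k : Int)) := by
      rw [PySem.List.pyRange_one 0 G']
      have h1 : (G' - 0).toNat = G := by omega
      rw [h1]
      exact List.map_congr_left (fun a _ => by simp)
    rw [hrange, List.nil_append]
    simp only [List.map_map]
    show _ = (List.map _ (List.range G), ([] : List String), (0 : Int)).1
    apply List.map_congr_left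
    intro g hg
    have hgm : ((g : Int)) * nc = ((g * m : Nat) : Int) := by push_cast [hm]; ring
    have hgm1 : ((g : Int) + 1) * nc = (((g + 1) * m : Nat) : Int) := by push_cast [hm]; ring
    have hslice : PySem.List.slice rs (some ((g : Int) * nc)) (some (((g : Int) + 1) * nc))
        = (rs.drop (g * m)).take m := by
      rw [hgm, hgm1, PySem.List.slice_natCast]
      congr 1
      have hq : (g + 1) * m = g * m + m := by ring
      omega
    simp only [Function.comp, hslice, pv_enum_chunk]
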